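-- pv_equiv track=rewrite | github.com/malyavko14/application_for_checking_SKNF | check_SKNF_properties.py | variables_in_formula
-- ===== SOURCE A (Python) =====
-- def variables_in_formula(formula):
--     variables = []
--     formula = formula.upper()
--     for i in range(65, 91):
--         symbol = chr(i)
--         if formula.count(symbol) > 0:
--             variables.append(symbol)
--     return variables
-- ===== SOURCE B (Python) =====
-- def variables_in_formula(formula):
--     seen = set()
--     for c in formula.upper():
--         if 'A' <= c <= 'Z':
--             seen.add(c)
--     return sorted(seen)
-- ===== Notes on version B (the rewrite author's own statement) =====
-- stated objective: alternative
-- what changed: Replaced the 26 alphabet-driven formula.count scans with a single pass over the string that collects present uppercase letters into a set, then sorts the set; the traversal flips from alphabet-with-inner-scan to string-once.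
import Mathlib
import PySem

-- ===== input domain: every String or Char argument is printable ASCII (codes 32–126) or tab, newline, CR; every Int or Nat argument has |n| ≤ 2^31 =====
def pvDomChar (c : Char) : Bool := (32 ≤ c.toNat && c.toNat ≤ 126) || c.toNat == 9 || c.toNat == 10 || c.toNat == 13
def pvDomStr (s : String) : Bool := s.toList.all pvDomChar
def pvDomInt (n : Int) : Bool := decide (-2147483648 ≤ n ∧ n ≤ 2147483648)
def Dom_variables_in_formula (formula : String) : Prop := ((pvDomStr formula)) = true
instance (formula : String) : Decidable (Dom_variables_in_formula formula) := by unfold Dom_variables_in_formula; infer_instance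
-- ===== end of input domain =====

-- B replaces A's 26 per-letter count scans of the formula by one pass over the string
-- collecting present uppercase letters into a set, followed by sorting that set.

-- ===== PORT A =====
def variables_in_formula (formula : String) : List String :=
  let f := PySem.Str.upper formula
  (PySem.List.pyRange 65 91 1).foldl (fun vars i =>
    -- chr(i) ported by hand as Char.ofNat i.toNat: exact for the codes 65..90 this loop uses
    let symbol : String := String.ofList [Char.ofNat i.toNat]
    if PySem.Str.count f symbol > 0 then vars ++ [symbol] else vars) []

-- ===== PORT B =====
def variables_in_formula_alt (formula : String) : List String :=
  -- Python iterates the 1-char strings of formula.upper(); 'A' <= c <= 'Z' on 1-char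
  -- strings equals the comparison of their single characters, ported as Char ≤.
  let seen : PySem.Set String := (PySem.Str.upper formula).toList.foldl
    (fun s c => if 'A' ≤ c ∧ c ≤ 'Z' then PySem.Set.add s (String.ofList [c]) else s)
    PySem.Set.empty
  PySem.List.sorted seen (fun x => x) false

-- ===== PRECONDITION & SPEC =====
def Spec_variables_in_formula (formula : String) (out : List String) : Prop := out = variables_in_formula_alt formula
instance (formula : String) (out : List String) : Decidable (Spec_variables_in_formula formula out) := by unfold Spec_variables_in_formula; infer_instance

-- ===== CLAIM (what is proved, stated in full; the proofs are below) =====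
def Claim_equal_variables_in_formula : Prop := ∀ (formula : String), Dom_variables_in_formula formula → Spec_variables_in_formula formula (variables_in_formula formula)

-- ===== LEMMAS AND PROOFS =====

/-- The 26 uppercase ASCII letters, in order. -/
def pvLetters : List Char :=
  ['A','B','C','D','E','F','G','H','I','J','K','L','M',
   'N','O','P','Q','R','S','T','U','V','W','X','Y','Z']

theorem pv_charA_le (c : Char) : 'A' ≤ c ↔ 65 ≤ c.toNat := by
  rw [Char.le_def, UInt32.le_iff_toNat_le]; exact Iff.rfl

theorem pv_charZ_ge (c : Char) : c ≤ 'Z' ↔ c.toNat ≤ 90 := by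
  rw [Char.le_def, UInt32.le_iff_toNat_le]; exact Iff.rfl

theorem pv_mk_lt_mk (a b : Char) :
    String.ofList [a] < String.ofList [b] ↔ a < b := by
  rw [String.lt_iff_toList_lt]
  simp only [String.toList_ofList]
  constructor
  · intro h
    rcases List.cons_lt_cons_iff.mp h with h | ⟨_, h2⟩
    · exact h
    · simp at h2
  · intro h
    exact List.cons_lt_cons_iff.mpr (Or.inl h)

theorem pv_mem_letters (c : Char) : c ∈ pvLetters ↔ ('A' ≤ c ∧ c ≤ 'Z') := by
  rw [pv_charA_le, pv_charZ_ge]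
  constructor
  · intro h
    fin_cases h <;> decide
  · rintro ⟨h1, h2⟩
    rw [← Char.ofNat_toNat c]
    set n := c.toNat with hn
    interval_cases n <;> decide

/-- str.count of a single character counts its occurrences (go-level invariant). -/
theorem pv_count_go_single (c : Char) :
    ∀ (fuel : Nat) (l : List Char) (acc : Nat), l.length ≤ fuel →
      PySem.Chars.count.go [c] fuel l acc = acc + l.count c := by
  intro fuel
  induction fuel with
  | zero =>
    intro l acc h
    have hl : l = [] := List.eq_nil_of_length_eq_zero (Nat.le_zero.mp h)
    subst hl; rfl
  | succ n ih =>
    intro l acc h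
    cases l with
    | nil => rfl
    | cons x t =>
      have hstep : PySem.Chars.count.go [c] (n+1) (x::t) acc
          = if [c].isPrefixOf (x::t) then PySem.Chars.count.go [c] n (List.drop 1 (x::t)) (acc+1)
            else PySem.Chars.count.go [c] n t acc := rfl
      rw [hstep]
      have hlen : t.length ≤ n := by simpa using h
      by_cases hx : c = x
      · subst hx
        rw [if_pos (by simp [List.isPrefixOf])]
        rw [List.drop_one, List.tail_cons, ih t (acc + 1) hlen]
        simp
        omega
      · rw [if_neg (by simp [List.isPrefixOf, hx])]
        rw [ih t acc hlen]
        simp [Ne.symm hx]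

theorem pv_count_single (l : List Char) (c : Char) :
    PySem.Chars.count l [c] = l.count c := by
  have h0 : PySem.Chars.count l [c] = PySem.Chars.count.go [c] l.length l 0 := rfl
  rw [h0, pv_count_go_single c l.length l 0 le_rfl, Nat.zero_add]

/-- A's append-if loop is a filter-then-map. -/
theorem pv_foldl_append_if (p : Int → Prop) [DecidablePred p] (g : Int → String) :
    ∀ (r : List Int) (acc : List String),
      r.foldl (fun vars i => if p i then vars ++ [g i] else vars) acc
        = acc ++ (r.filter (fun i => decide (p i))).map g := by
  intro r
  induction r with
  | nil => intro acc; simp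
  | cons x t ih =>
    intro acc
    by_cases hx : p x <;> simp [hx, ih]

/-- Membership in B's set-building fold. -/
theorem pv_mem_seen (s : String) :
    ∀ (l : List Char) (acc : PySem.Set String),
      s ∈ l.foldl
          (fun s c => if 'A' ≤ c ∧ c ≤ 'Z' then PySem.Set.add s (String.ofList [c]) else s)
          acc
        ↔ s ∈ acc ∨ ∃ c ∈ l, ('A' ≤ c ∧ c ≤ 'Z') ∧ s = String.ofList [c] := by
  intro l
  induction l with
  | nil => intro acc; simp
  | cons x t ih =>
    intro acc
    by_cases hx : 'A' ≤ x ∧ x ≤ 'Z'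
    · simp only [List.foldl_cons, if_pos hx, ih, PySem.Set.mem_add]
      constructor
      · rintro (⟨h | h⟩ | ⟨c, hc, hb, hs⟩)
        · exact Or.inl h
        · exact Or.inr ⟨x, List.mem_cons_self, hx, h⟩
        · exact Or.inr ⟨c, List.mem_cons_of_mem _ hc, hb, hs⟩
      · rintro (h | ⟨c, hc, hb, hs⟩)
        · exact Or.inl (Or.inl h)
        · rcases List.mem_cons.mp hc with rfl | hc
          · exact Or.inl (Or.inr hs)
          · exact Or.inr ⟨c, hc, hb, hs⟩
    · simp only [List.foldl_cons, if_neg hx, ih]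
      constructor
      · rintro (h | ⟨c, hc, hb, hs⟩)
        · exact Or.inl h
        · exact Or.inr ⟨c, List.mem_cons_of_mem _ hc, hb, hs⟩
      · rintro (h | ⟨c, hc, hb, hs⟩)
        · exact Or.inl h
        · rcases List.mem_cons.mp hc with rfl | hc
          · exact absurd hb hx
          · exact Or.inr ⟨c, hc, hb, hs⟩

/-- B's set-building fold keeps the list duplicate-free. -/
theorem pv_nodup_seen :
    ∀ (l : List Char) (acc : PySem.Set String), acc.Nodup →
      (l.foldl
          (fun s c => if 'A' ≤ c ∧ c ≤ 'Z' then PySem.Set.add s (String.ofList [c]) else s)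
          acc).Nodup := by
  intro l
  induction l with
  | nil => intro acc h; simpa
  | cons x t ih =>
    intro acc h
    by_cases hx : 'A' ≤ x ∧ x ≤ 'Z'
    · simp only [List.foldl_cons, if_pos hx]
      exact ih _ (PySem.Set.nodup_add _ _ h)
    · simp only [List.foldl_cons, if_neg hx]
      exact ih _ h

set_option maxHeartbeats 1000000 in
/-- A computes the present letters in alphabetical order, as a filter of pvLetters. -/
theorem pv_A_eq (formula : String) :
    variables_in_formula formula
      = (pvLetters.filter
            (fun c => decide (c ∈ (PySem.Str.upper formula).toList))).map
          (fun c => String.ofList [c]) := by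
  unfold variables_in_formula
  rw [pv_foldl_append_if (p := fun i =>
        PySem.Str.count (PySem.Str.upper formula) (String.ofList [Char.ofNat i.toNat]) > 0)
      (g := fun i => String.ofList [Char.ofNat i.toNat])]
  rw [List.nil_append]
  have hmap : pvLetters = (PySem.List.pyRange 65 91 1).map (fun i => Char.ofNat i.toNat) := by
    rfl
  rw [hmap, List.filter_map, List.map_map]
  congr 1
  apply List.filter_congr
  intro i _
  simp only [Function.comp, decide_eq_decide]
  rw [PySem.Str.count_eq]
  have : (String.ofList [Char.ofNat i.toNat]).toList = [Char.ofNat i.toNat] := by simp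
  rw [this, pv_count_single]
  exact ⟨fun h => List.count_pos_iff.mp h, fun h => List.count_pos_iff.mpr h⟩

theorem variables_in_formula_agree (formula : String) :
    variables_in_formula formula = variables_in_formula_alt formula := by
  rw [pv_A_eq]
  unfold variables_in_formula_alt
  set U := (PySem.Str.upper formula).toList with hU
  set ys := (pvLetters.filter (fun c => decide (c ∈ U))).map (fun c => String.ofList [c]) with hys
  set seen := U.foldl
    (fun s c => if 'A' ≤ c ∧ c ≤ 'Z' then PySem.Set.add s (String.ofList [c]) else s)
    PySem.Set.empty with hseen
  have hpair : ys.Pairwise (· < ·) := by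
    apply List.Pairwise.map
    · intro a b hab
      exact (pv_mk_lt_mk a b).mpr hab
    · exact (List.Pairwise.filter _) (by decide : pvLetters.Pairwise (· < ·))
  have hnodup_ys : ys.Nodup := hpair.imp (fun h => ne_of_lt h)
  have hnodup_seen : (seen : List String).Nodup := pv_nodup_seen U _ (by simp [PySem.Set.empty])
  have hmem : ∀ s, s ∈ ys ↔ s ∈ (seen : List String) := by
    intro s
    rw [hys, hseen, pv_mem_seen]
    simp only [List.mem_map, List.mem_filter, decide_eq_true_iff, PySem.Set.empty,
      List.not_mem_nil, false_or]
    constructor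
    · rintro ⟨c, ⟨hl, hu⟩, rfl⟩
      exact ⟨c, hu, (pv_mem_letters c).mp hl, rfl⟩
    · rintro ⟨c, hu, hb, rfl⟩
      exact ⟨c, ⟨(pv_mem_letters c).mpr hb, hu⟩, rfl⟩
  have hperm : ys.Perm (seen : List String) :=
    (List.perm_ext_iff_of_nodup hnodup_ys hnodup_seen).mpr hmem
  exact (PySem.List.sorted_eq_of_perm_of_pairwise_lt seen ys (fun x => x) hperm hpair).symm

-- ===== VERDICT (by name: the statement is the Claim_ definition above) =====
theorem variables_in_formula_spec : Claim_equal_variables_in_formula := by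
  intro formula _
  unfold Spec_variables_in_formula
  exact variables_in_formula_agree formula
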